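-- pv_equiv track=rewrite | github.com/PragmaticPhil/microbitDataGatherer | data_StartStopPt.py | findEndReference
-- ===== SOURCE A (Python) =====
-- def findEndReference(accReadingList, startPoint):   #   Here we need to find where the last increase begins.
--     patternRef = 0                      #   we could start at the end, work back until we find a pattern, then work back to where it begins.
--                                         #   That would be the clever way.  But I am going for the easy way:
--     #   Rem - we want to find the Start of the last pattern of sustained increase...
--     listPointer = startPoint
--
--     while(listPointer < len(accReadingList) - 5):   #   we go for brute force - work through ALL the data point 1-by-1 recording pattern starts.
--         patternStart = checkPatternRecursions(listPointer, 1, 5, accReadingList)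
--         listPointer += 1
--         if(patternStart == -1):           #   a pattern has been found.  Rem - by definition we may find that the next point is also a pattern start.
--             patternRef = listPointer       #   record where the pattern starts.
--
--     return findCurrentPatternStart(patternRef, 1 ,5, accReadingList)    # finds where current pattern starts
--
-- def findCurrentPatternStart(startRef, patternInt, patternLength, accReadingList):
--     #   Here we have found a point on the last pattern, BUT if is is part of a LONGER pattern our reference is not the start point of that.
--     #   So, we work backwards (in the data set) from the point we found above to find where the pattern starts:
--     patternFound = True
--
--     while(patternFound and startRef > 1):
--         startRef += -1
--         if(checkPatternRecursions(startRef, patternInt, patternLength, accReadingList) > 0):    #   no pattern found = success!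
--             return (startRef + 1)
--
--     return -1
--
-- def checkPatternRecursions(startRef, patternLength, patternInt, accReadingList):
--     #   we are going to iterate patternLength times through values adjacent to accReadingList[startRef] and check whether there is a consistent change
--     #   in acceleration in the direct 1*patternInt  (note - patternInt is 1 or -1)
--     #   we should return a bool, but if we fail to detect a pattern it makes sense to communicate where it broke, so next time this is called
--     #   we can start at the break, rather than repeat the checking of the values leading up to the break.
--     #   We'll return -1 to indicate a successful pattern detection.
--
--     for i in range(0, patternLength):
--
--         fitsPattern = patternInt * (accReadingList[startRef + i+1] - accReadingList[startRef + i])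
--         #   fitsPattern > 0 means:
--         #   ... if patternInt = -1 and PointDif < 0 we are decelerating and looking for a decelerating pattern.
--         #   ... if patternInt = 1 and PointDif > 0 we are accelerating and looking for an accelerating pattern.
--         #   fitsPattern < 0
--         #   ... if patternInt = 1 and PointDif < 0 we are decelerating and looking for an accelerating pattern.
--         #   ... if patternInt = -1 and PointDif > 0 we are accelerating and looking for an decelerating pattern.
--
--         #   SO... when fitsPattern <0 we know that our pattern is not observed, so we do an early exit:
--         if(fitsPattern <= 0):    return (i+1)    #   i+1 ensures we don't get stuck in an infinite recurrsion in findStartReference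
--
--     #   At this point we've checked patternLength adjacent values and no exception to the pattern has been found, so a pattern exists.
--     #   we return -1 to indicate we found the pattern:
--     return -1
-- ===== SOURCE B (Python) =====
-- def findEndReference(accReadingList, startPoint):
--     # Single backward pass: find the last strictly-increasing step at or after
--     # startPoint (scanning from the end), then keep walking down while the step
--     # stays increasing to locate the start of that run.
--     j = len(accReadingList) - 6
--     while j >= startPoint and accReadingList[j + 1] <= accReadingList[j]:
--         j -= 1
--     if j < startPoint or j <= 0:
--         return -1
--     s = j - 1
--     while s > 0:
--         if accReadingList[s + 1] <= accReadingList[s]: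
--             return s + 1
--         s -= 1
--     return -1
-- ===== Notes on version B (the rewrite author's own statement) =====
-- stated objective: faster
-- what changed: Replaces A's full forward sweep over every index (recording each pattern start) plus a separate backward walk with a single backward scan from the end that stops at the last increasing step and then walks down to the run's start.
-- outside the precondition, e.g. on findEndReference([1, 2, 3], -10): A raises IndexError, B returns -1
import Mathlib
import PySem

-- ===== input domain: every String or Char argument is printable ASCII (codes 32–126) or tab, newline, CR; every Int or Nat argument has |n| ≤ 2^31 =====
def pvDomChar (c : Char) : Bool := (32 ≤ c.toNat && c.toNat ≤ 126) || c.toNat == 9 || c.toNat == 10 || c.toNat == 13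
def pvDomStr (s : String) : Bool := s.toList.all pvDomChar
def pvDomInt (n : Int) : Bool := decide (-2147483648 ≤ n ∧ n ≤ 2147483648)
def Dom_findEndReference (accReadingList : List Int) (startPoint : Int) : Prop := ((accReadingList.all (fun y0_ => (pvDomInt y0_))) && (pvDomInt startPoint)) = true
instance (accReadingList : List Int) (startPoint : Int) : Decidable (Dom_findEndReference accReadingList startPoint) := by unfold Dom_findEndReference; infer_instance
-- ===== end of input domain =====

-- B replaces A's full forward sweep plus separate backward walk with a single backward
-- scan from the end (objective: faster by a constant-factor mechanism — it can stop early).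


-- ===== PORT A =====
-- for i in range(0, patternLength): loop with early return (pyGetD is exact here because
-- Pre_ rules out exactly the IndexError inputs)
def checkPatternGo (startRef patternInt : Int) (accReadingList : List Int) : List Int → Int
  | [] => -1
  | i :: rest =>
    if patternInt * (PySem.List.pyGetD accReadingList (startRef + i + 1) 0
        - PySem.List.pyGetD accReadingList (startRef + i) 0) ≤ 0 then i + 1
    else checkPatternGo startRef patternInt accReadingList rest

def checkPatternRecursions (startRef patternLength patternInt : Int) (accReadingList : List Int) : Int :=
  checkPatternGo startRef patternInt accReadingList (PySem.List.pyRange 0 patternLength 1)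

-- while(patternFound and startRef > 1): startRef += -1; … (patternFound is never set False)
def findCurrentPatternStart (startRef patternInt patternLength : Int) (accReadingList : List Int) : Int :=
  if h : startRef > 1 then
    if checkPatternRecursions (startRef - 1) patternInt patternLength accReadingList > 0 then (startRef - 1) + 1
    else findCurrentPatternStart (startRef - 1) patternInt patternLength accReadingList
  else -1
termination_by (startRef - 1).toNat
decreasing_by omega

-- the main while-loop of findEndReference, state = (listPointer, patternRef)
def findEndLoop (accReadingList : List Int) (listPointer patternRef : Int) : Int :=
  if h : listPointer < (accReadingList.length : Int) - 5 then
    findEndLoop accReadingList (listPointer + 1)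
      (if checkPatternRecursions listPointer 1 5 accReadingList = -1 then listPointer + 1 else patternRef)
  else findCurrentPatternStart patternRef 1 5 accReadingList
termination_by ((accReadingList.length : Int) - 5 - listPointer).toNat
decreasing_by omega

def findEndReference (accReadingList : List Int) (startPoint : Int) : Int :=
  findEndLoop accReadingList startPoint 0

-- ===== PORT B =====
-- backward scan: decrement j while j >= startPoint and the step at j is not increasing
def bScan (accReadingList : List Int) (j startPoint : Int) : Int :=
  if h : startPoint ≤ j ∧
      PySem.List.pyGetD accReadingList (j + 1) 0 ≤ PySem.List.pyGetD accReadingList j 0 then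
    bScan accReadingList (j - 1) startPoint
  else j
termination_by (j - startPoint + 1).toNat
decreasing_by omega

-- walk down while the step stays increasing; the first non-increase gives the run start
def bWalk (accReadingList : List Int) (s : Int) : Int :=
  if h : s > 0 then
    if PySem.List.pyGetD accReadingList (s + 1) 0 ≤ PySem.List.pyGetD accReadingList s 0 then s + 1
    else bWalk accReadingList (s - 1)
  else -1
termination_by s.toNat
decreasing_by omega

def findEndReference_alt (accReadingList : List Int) (startPoint : Int) : Int :=
  let j := bScan accReadingList ((accReadingList.length : Int) - 6) startPoint
  if j < startPoint ∨ j ≤ 0 then -1 else bWalk accReadingList (j - 1)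

-- ===== PRECONDITION & SPEC =====
-- Pre_ excludes exactly the inputs where Python A raises IndexError: the loop is entered
-- (startPoint < len-5) with startPoint below -len, so its first negative-index access is out of range.
def Pre_findEndReference (accReadingList : List Int) (startPoint : Int) : Prop :=
  -(accReadingList.length : Int) ≤ startPoint ∨ (accReadingList.length : Int) - 5 ≤ startPoint

instance (accReadingList : List Int) (startPoint : Int) : Decidable (Pre_findEndReference accReadingList startPoint) := by
  unfold Pre_findEndReference; infer_instance

def pvWitness_findEndReference : List Int × Int := ([0, 1, 2, 0, 1, 2, 3, 4, 5, 0], 0)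

def Spec_findEndReference (accReadingList : List Int) (startPoint : Int) (out : Int) : Prop := out = findEndReference_alt accReadingList startPoint
instance (accReadingList : List Int) (startPoint : Int) (out : Int) : Decidable (Spec_findEndReference accReadingList startPoint out) := by unfold Spec_findEndReference; infer_instance

-- ===== CLAIM (what is proved, stated in full; the proofs are below) =====
def Claim_equal_findEndReference : Prop := ∀ (accReadingList : List Int) (startPoint : Int), Dom_findEndReference accReadingList startPoint → Pre_findEndReference accReadingList startPoint → Spec_findEndReference accReadingList startPoint (findEndReference accReadingList startPoint)

-- ===== LEMMAS AND PROOFS =====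

theorem check15 (l : List Int) (s : Int) :
    checkPatternRecursions s 1 5 l = if PySem.List.pyGetD l s 0 < PySem.List.pyGetD l (s + 1) 0 then -1 else 1 := by
  have hr : PySem.List.pyRange 0 1 1 = [0] := by decide
  simp only [checkPatternRecursions, hr, checkPatternGo, add_zero]
  split_ifs with h1 h2 h2 <;> first | rfl | omega

theorem bScan_stop (l : List Int) (j sp : Int) (h : j < sp) : bScan l j sp = j := by
  unfold bScan; rw [dif_neg]; omega

theorem bScan_ge (l : List Int) (j sp : Int) (h : sp - 1 ≤ j) : sp - 1 ≤ bScan l j sp := by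
  unfold bScan
  split_ifs with hc
  · exact bScan_ge l (j - 1) sp (by omega)
  · omega
termination_by (j - sp + 1).toNat
decreasing_by omega

theorem bScan_inc (l : List Int) (j sp : Int) :
    bScan l j sp < sp ∨ PySem.List.pyGetD l (bScan l j sp) 0 < PySem.List.pyGetD l (bScan l j sp + 1) 0 := by
  unfold bScan
  split_ifs with hc
  · exact bScan_inc l (j - 1) sp
  · by_cases h1 : j < sp
    · exact Or.inl h1
    · right; omega
termination_by (j - sp + 1).toNat
decreasing_by omega

theorem bScan_step (l : List Int) (t sp : Int) (h : sp ≤ t) :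
    bScan l t sp =
      (if sp + 1 ≤ bScan l t (sp + 1) then bScan l t (sp + 1)
       else if PySem.List.pyGetD l sp 0 < PySem.List.pyGetD l (sp + 1) 0 then sp else sp - 1) := by
  by_cases ht : t = sp
  · subst ht
    rw [show bScan l t (t + 1) = t from bScan_stop l t (t + 1) (by omega)]
    rw [if_neg (by omega)]
    unfold bScan
    split_ifs with hc h2 h2
    · omega
    · rw [bScan_stop l (t - 1) t (by omega)]
    · rfl
    · omega
  · have ht' : sp < t := lt_of_le_of_ne h (fun e => ht e.symm)
    by_cases hinc : PySem.List.pyGetD l t 0 < PySem.List.pyGetD l (t + 1) 0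
    · have e1 : bScan l t sp = t := by
        unfold bScan; rw [dif_neg]; omega
      have e2 : bScan l t (sp + 1) = t := by
        unfold bScan; rw [dif_neg]; omega
      rw [e1, e2, if_pos (by omega)]
    · have e1 : bScan l t sp = bScan l (t - 1) sp := by
        rw [bScan]; rw [dif_pos ⟨by omega, by omega⟩]
      have e2 : bScan l t (sp + 1) = bScan l (t - 1) (sp + 1) := by
        rw [bScan]; rw [dif_pos ⟨by omega, by omega⟩]
      rw [e1, e2]
      exact bScan_step l (t - 1) sp (by omega)
termination_by (t - sp).toNat
decreasing_by omega

theorem fcs_eq_bWalk (l : List Int) (pr : Int) :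
    findCurrentPatternStart pr 1 5 l = bWalk l (pr - 1) := by
  rw [findCurrentPatternStart]
  conv_rhs => rw [bWalk]
  by_cases h1 : pr > 1
  · rw [dif_pos h1, dif_pos (show pr - 1 > 0 by omega), check15]
    by_cases hi : PySem.List.pyGetD l (pr - 1) 0 < PySem.List.pyGetD l (pr - 1 + 1) 0
    · rw [if_pos hi, if_neg (show ¬((-1 : Int) > 0) by omega),
        if_neg (show ¬(PySem.List.pyGetD l (pr - 1 + 1) 0 ≤ PySem.List.pyGetD l (pr - 1) 0) by
          omega)]
      exact fcs_eq_bWalk l (pr - 1)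
    · rw [if_neg hi, if_pos (show (1 : Int) > 0 by omega),
        if_pos (show PySem.List.pyGetD l (pr - 1 + 1) 0 ≤ PySem.List.pyGetD l (pr - 1) 0 by
          omega)]
  · rw [dif_neg h1, dif_neg (show ¬(pr - 1 > 0) by omega)]
termination_by (pr - 1).toNat
decreasing_by omega

-- main correspondence: the forward sweep with accumulator pr equals the backward scan
theorem loop_eq (l : List Int) (lp pr : Int) :
    findEndLoop l lp pr =
      findCurrentPatternStart
        (if lp ≤ bScan l ((l.length : Int) - 6) lp then bScan l ((l.length : Int) - 6) lp + 1 else pr)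
        1 5 l := by
  by_cases h : lp < (l.length : Int) - 5
  · rw [findEndLoop, dif_pos h,
      loop_eq l (lp + 1) (if checkPatternRecursions lp 1 5 l = -1 then lp + 1 else pr)]
    have hstep := bScan_step l ((l.length : Int) - 6) lp (by omega)
    have hge := bScan_ge l ((l.length : Int) - 6) (lp + 1) (by omega)
    rw [check15, hstep]
    split_ifs <;> first | rfl | omega | (exfalso; omega)
  · rw [findEndLoop, dif_neg h, bScan_stop l ((l.length : Int) - 6) lp (by omega),
      if_neg (show ¬(lp ≤ (l.length : Int) - 6) by omega)]
termination_by ((l.length : Int) - 5 - lp).toNat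
decreasing_by omega

-- ===== VERDICT (by name: the statement is the Claim_ definition above) =====
theorem findEndReference_spec : Claim_equal_findEndReference := by
  intro l sp _ _
  unfold Spec_findEndReference findEndReference findEndReference_alt
  rw [loop_eq]
  simp only []
  set j := bScan l ((l.length : Int) - 6) sp with hj
  by_cases hc : sp ≤ j
  · rw [if_pos hc]
    rcases bScan_inc l ((l.length : Int) - 6) sp with hlt | hinc
    · omega
    · rw [← hj] at hinc
      rw [fcs_eq_bWalk]
      by_cases hz : j ≤ 0
      · rw [if_pos (Or.inr hz)]
        conv_lhs => rw [bWalk]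
        rw [dif_neg (show ¬(j + 1 - 1 > 0) by omega)]
      · rw [if_neg (show ¬(j < sp ∨ j ≤ 0) by omega),
          show j + 1 - 1 = j from by omega]
        conv_lhs => rw [bWalk]
        rw [dif_pos (show j > 0 by omega),
          if_neg (show ¬(PySem.List.pyGetD l (j + 1) 0 ≤ PySem.List.pyGetD l j 0) by
            omega)]
  · rw [if_neg hc, fcs_eq_bWalk, if_pos (Or.inl (by omega))]
    conv_lhs => rw [bWalk]
    rw [dif_neg (show ¬((0:Int) - 1 > 0) by omega)]
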